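-- pv_equiv track=rewrite | github.com/shuang2099/Auto-evacuation-network-modeling-tool | evac_tool/_internal/moduels/Evac_visual.py | find_continuous_indexes
-- ===== SOURCE A (Python) =====
-- def find_continuous_indexes(array):
--     continuous_indexes = {}
--     start_index = None
--     for i, num in enumerate(array):
--         if num > 100000:
--             if start_index is None:
--                 start_index = i
--         elif start_index is not None:
--             end_index = i - 1
--             if end_index - start_index + 1 >= 3:
--                 value = array[start_index] // 100000
--                 continuous_indexes[value] = (start_index, end_index)
--             start_index = None
--
--     if start_index is not None:
--         end_index = len(array) - 1
--         if end_index - start_index + 1 >= 3: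
--             value = array[start_index] // 100000
--             continuous_indexes[value] = (start_index, end_index)
--
--     return continuous_indexes if continuous_indexes else None
-- ===== SOURCE B (Python) =====
-- def find_continuous_indexes(array):
--     # Staged passes: flag each element, detect run boundaries by comparing the
--     # flag sequence with shifted copies of itself, then zip starts with ends.
--     flags = [num > 100000 for num in array]
--     starts = [i for i, (prev, cur) in enumerate(zip([False] + flags, flags))
--               if cur and not prev]
--     ends = [i for i, (cur, nxt) in enumerate(zip(flags, flags[1:] + [False]))
--             if cur and not nxt]
--     res = {array[s] // 100000: (s, e) for s, e in zip(starts, ends) if e - s + 1 >= 3}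
--     return res if res else None
-- ===== Notes on version B (the rewrite author's own statement) =====
-- stated objective: alternative
-- what changed: Replaces A's single-pass state machine (optional start_index threaded through one loop plus a post-loop flush) with staged passes: a boolean flag list, run starts and ends found independently by comparing the flag list with shifted copies of itself, then starts zipped with ends and filtered by length into the dict.
import Mathlib
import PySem

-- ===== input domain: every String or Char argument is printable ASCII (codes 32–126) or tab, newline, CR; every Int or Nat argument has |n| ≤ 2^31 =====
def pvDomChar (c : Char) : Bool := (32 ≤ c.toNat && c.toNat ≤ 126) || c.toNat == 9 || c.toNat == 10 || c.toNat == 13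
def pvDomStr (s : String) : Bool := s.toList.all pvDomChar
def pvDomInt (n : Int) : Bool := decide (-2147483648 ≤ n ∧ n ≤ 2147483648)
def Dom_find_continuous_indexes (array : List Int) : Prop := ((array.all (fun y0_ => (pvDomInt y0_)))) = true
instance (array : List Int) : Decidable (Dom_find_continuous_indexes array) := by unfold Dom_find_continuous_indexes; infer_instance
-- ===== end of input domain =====

-- B replaces A's single-pass start_index state machine with staged passes (flag list,
-- boundary detection against shifted copies, zip of starts with ends); same O(n) cost.

-- ===== PORT A =====
-- loop body of A's for-loop (state = (continuous_indexes, start_index)); array[start_index] is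
-- ported as pyGet?.getD 0 — the index is always in range when A reads it, so this is exact
def stepA (array : List Int) : (PySem.Dict Int (Int × Int) × Option Int) → Int × Int → (PySem.Dict Int (Int × Int) × Option Int)
  | (d, start), (i, num) =>
    if num > 100000 then
      match start with
      | none => (d, some i)
      | some _ => (d, start)
    else
      match start with
      | some s =>
        let e := i - 1
        if e - s + 1 ≥ 3 then
          (d.insert (PySem.Int.floordiv ((PySem.List.pyGet? array s).getD 0) 100000) (s, e), none)
        else (d, none)
      | none => (d, none)

-- A's post-loop flush of a still-open run
def finalA (array : List Int) (st : PySem.Dict Int (Int × Int) × Option Int) : PySem.Dict Int (Int × Int) :=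
  match st.2 with
  | some s =>
    let e := (array.length : Int) - 1
    if e - s + 1 ≥ 3 then
      st.1.insert (PySem.Int.floordiv ((PySem.List.pyGet? array s).getD 0) 100000) (s, e)
    else st.1
  | none => st.1

def find_continuous_indexes (array : List Int) : Option (List (Int × Int × Int)) :=
  let st := (PySem.List.enumerate array 0).foldl (stepA array) (PySem.Dict.empty, none)
  let d := finalA array st
  if d.items.isEmpty then none else some d.items

-- ===== PORT B =====
-- Source B line by line: flags = [num > 100000 for num in array]; starts/ends are comprehensions
-- over enumerate(zip(shifted, flags)); flags[1:] is ported as drop 1 (exact: start index 1 ≥ 0);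
-- [False] + flags is false :: flags; the dict comprehension is a left fold of conditional inserts.
def find_continuous_indexes_alt (array : List Int) : Option (List (Int × Int × Int)) :=
  let flags := array.map (fun num => decide (num > 100000))
  let starts := ((PySem.List.enumerate (List.zip (false :: flags) flags) 0).filter
      (fun p => p.2.2 && !p.2.1)).map (fun p => p.1)
  let ends := ((PySem.List.enumerate (List.zip flags (flags.drop 1 ++ [false])) 0).filter
      (fun p => p.2.1 && !p.2.2)).map (fun p => p.1)
  let d := (List.zip starts ends).foldl (fun d se =>
      if se.2 - se.1 + 1 ≥ 3 then
        d.insert (PySem.Int.floordiv ((PySem.List.pyGet? array se.1).getD 0) 100000) se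
      else d) PySem.Dict.empty
  if d.items.isEmpty then none else some d.items

-- ===== PRECONDITION & SPEC =====
def Spec_find_continuous_indexes (array : List Int) (out : Option (List (Int × Int × Int))) : Prop := out = find_continuous_indexes_alt array
instance (array : List Int) (out : Option (List (Int × Int × Int))) : Decidable (Spec_find_continuous_indexes array out) := by unfold Spec_find_continuous_indexes; infer_instance

-- ===== CLAIM (what is proved, stated in full; the proofs are below) =====
def Claim_equal_find_continuous_indexes : Prop := ∀ (array : List Int), Dom_find_continuous_indexes array → Spec_find_continuous_indexes array (find_continuous_indexes array)

-- ===== LEMMAS AND PROOFS =====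

-- structural recursion equivalent to A's foldl over enumerate
def recA (array : List Int) : List Int → Int → (PySem.Dict Int (Int × Int) × Option Int) → (PySem.Dict Int (Int × Int) × Option Int)
  | [], _, st => st
  | x :: xs, k, st => recA array xs (k + 1) (stepA array st (k, x))

theorem foldA_eq_recA (array : List Int) (l : List Int) : ∀ (k : Int) (st : PySem.Dict Int (Int × Int) × Option Int),
    (PySem.List.enumerate l k).foldl (stepA array) st = recA array l k st := by
  induction l with
  | nil => intro k st; simp [PySem.List.enumerate_nil, recA]
  | cons x xs ih => intro k st; simp [PySem.List.enumerate_cons, recA, ih]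

-- the conditional insert both programs perform for a run (s, e)
def pvEmit (array : List Int) (d : PySem.Dict Int (Int × Int)) (se : Int × Int) : PySem.Dict Int (Int × Int) :=
  if se.2 - se.1 + 1 ≥ 3 then
    d.insert (PySem.Int.floordiv ((PySem.List.pyGet? array se.1).getD 0) 100000) se
  else d

-- abstract list of maximal runs of true flags, with an optional pending start
def runsB (k : Int) (p : Option Int) : List Bool → List (Int × Int)
  | [] => match p with | none => [] | some s => [(s, k - 1)]
  | f :: r =>
    if f then runsB (k + 1) (some (p.getD k)) r
    else match p with
      | some s => (s, k - 1) :: runsB (k + 1) none r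
      | none => runsB (k + 1) none r

-- run starts / run ends as structural recursions over the flag list
def startsL (prev : Bool) (k : Int) : List Bool → List Int
  | [] => []
  | f :: r => if f && !prev then k :: startsL f (k + 1) r else startsL f (k + 1) r

def endsL (k : Int) : List Bool → List Int
  | [] => []
  | f :: r => if f && !(r.headD false) then k :: endsL (k + 1) r else endsL (k + 1) r

theorem startsL_false_cons (p : Bool) (k : Int) (r : List Bool) :
    startsL p k (false :: r) = startsL false (k + 1) r := by
  simp [startsL]

-- the starts comprehension computes startsL
theorem starts_eq (flags : List Bool) : ∀ (prev : Bool) (k : Int),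
    ((PySem.List.enumerate (List.zip (prev :: flags) flags) k).filter
      (fun p => p.2.2 && !p.2.1)).map (fun p => p.1) = startsL prev k flags := by
  induction flags with
  | nil => intro prev k; simp [PySem.List.enumerate_nil, startsL]
  | cons f r ih =>
    intro prev k
    simp only [List.zip_cons_cons, PySem.List.enumerate_cons, List.filter_cons, startsL]
    by_cases h : f && !prev
    · simp [h, ih]
    · simp [h, ih]

-- the ends comprehension computes endsL
theorem ends_eq (flags : List Bool) : ∀ (k : Int),
    ((PySem.List.enumerate (List.zip flags (flags.drop 1 ++ [false])) k).filter
      (fun p => p.2.1 && !p.2.2)).map (fun p => p.1) = endsL k flags := by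
  induction flags with
  | nil => intro k; simp [PySem.List.enumerate_nil, endsL]
  | cons f r ih =>
    intro k
    cases r with
    | nil => by_cases h : f <;> simp [PySem.List.enumerate_cons, PySem.List.enumerate_nil, endsL, h]
    | cons g r' =>
      have ih' := ih (k + 1)
      by_cases h : f && !g <;>
        simp [List.zip_cons_cons, PySem.List.enumerate_cons, endsL, h] at ih' ⊢ <;>
        simp [ih']

-- zipping starts with ends yields exactly the maximal runs
theorem zip_runs (flags : List Bool) : ∀ (k : Int),
    (List.zip (startsL false k flags) (endsL k flags) = runsB k none flags) ∧
    (∀ (s : Int) (r' : List Bool), flags = true :: r' →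
      List.zip (s :: startsL true k flags) (endsL k flags) = runsB k (some s) flags) := by
  induction flags with
  | nil =>
    intro k
    refine ⟨by simp [startsL, endsL, runsB], ?_⟩
    intro s r' h; exact absurd h (by simp)
  | cons f r ih =>
    intro k
    constructor
    · -- (a): no pending start
      cases f with
      | false =>
        have h1 := (ih (k + 1)).1
        simpa [startsL, endsL, runsB] using h1
      | true =>
        cases r with
        | nil => simp [startsL, endsL, runsB]
        | cons g r' =>
          cases g with
          | true =>
            have h2 := (ih (k + 1)).2 k r' rfl
            simpa [startsL, endsL, runsB] using h2
          | false =>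
            have h1 := (ih (k + 1)).1
            simpa [startsL, endsL, runsB, startsL_false_cons, List.zip_cons_cons] using h1
    · -- (b): pending start s, first flag true
      intro s r0 hcons
      injection hcons with hf hr
      subst hf
      subst hr
      cases r with
      | nil => simp [startsL, endsL, runsB]
      | cons g r' =>
        cases g with
        | true =>
          have h2 := (ih (k + 1)).2 s r' rfl
          simpa [startsL, endsL, runsB] using h2
        | false =>
          have h1 := (ih (k + 1)).1
          simpa [startsL, endsL, runsB, startsL_false_cons, List.zip_cons_cons] using h1

-- A's state machine folds the conditional inserts over exactly the runs
theorem recA_runs (array : List Int) (l : List Int) : ∀ (k : Int) (d : PySem.Dict Int (Int × Int)) (p : Option Int),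
    k + (l.length : Int) = (array.length : Int) →
    finalA array (recA array l k (d, p)) =
      (runsB k p (l.map (fun num => decide (num > 100000)))).foldl (pvEmit array) d := by
  induction l with
  | nil =>
    intro k d p hk
    cases p with
    | none => simp [recA, finalA, runsB]
    | some s =>
      simp only [recA, finalA, List.map_nil, runsB, List.foldl_cons, List.foldl_nil, pvEmit]
      simp only [List.length_nil, Int.natCast_zero, add_zero] at hk
      rw [hk]
  | cons x xs ih =>
    intro k d p hk
    have hk' : (k + 1) + (xs.length : Int) = (array.length : Int) := by
      simp only [List.length_cons] at hk; push_cast at hk ⊢; omega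
    by_cases hx : x > 100000
    · have hflag : decide (x > 100000) = true := by simpa using hx
      cases p with
      | none =>
        have hs : stepA array (d, none) (k, x) = (d, some k) := by simp [stepA, hx]
        simp only [recA]
        rw [hs, ih (k + 1) d (some k) hk']
        simp [runsB, hflag]
      | some s =>
        have hs : stepA array (d, some s) (k, x) = (d, some s) := by simp [stepA, hx]
        simp only [recA]
        rw [hs, ih (k + 1) d (some s) hk']
        simp [runsB, hflag]
    · have hflag : decide (x > 100000) = false := by simpa using hx
      cases p with
      | none =>
        have hs : stepA array (d, none) (k, x) = (d, none) := by
          simp only [stepA, if_neg hx]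
        simp only [recA]
        rw [hs, ih (k + 1) d none hk']
        simp [runsB, hflag]
      | some s =>
        have hs : stepA array (d, some s) (k, x) = (pvEmit array d (s, k - 1), none) := by
          simp only [stepA, if_neg hx, pvEmit]
          split_ifs <;> rfl
        simp only [recA]
        rw [hs, ih (k + 1) (pvEmit array d (s, k - 1)) none hk']
        simp [runsB, hflag]

-- ===== VERDICT (by name: the statement is the Claim_ definition above) =====
theorem find_continuous_indexes_spec : Claim_equal_find_continuous_indexes := by
  intro array _
  unfold Spec_find_continuous_indexes
  simp only [find_continuous_indexes, find_continuous_indexes_alt]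
  rw [foldA_eq_recA, recA_runs array array 0 PySem.Dict.empty none (by simp),
    starts_eq, ends_eq, (zip_runs (array.map (fun num => decide (num > 100000))) 0).1]
  rfl
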